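-- pv_equiv track=rewrite | github.com/mudouble/python_practice | coding/0918.py | func7
-- ===== SOURCE A (Python) =====
-- from collections import defaultdict
--
-- def func7(n, edges):
--     '''图的染色'''
--     tree = defaultdict(list)
--     for u, v in edges:
--         tree[u].append(v)
--         tree[v].append(u)
--     colors = [-1]*(n+1)
--
--     def dfs(node, parent_color):
--         current_color = 1-parent_color
--         colors[node] = current_color
--         for neighbor in tree[node]:
--             if colors[neighbor] == -1:
--                 dfs(neighbor, current_color)
--     dfs(1, 1)
--     return colors[1:]
-- ===== SOURCE B (Python) =====
-- def func7(n, edges):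
--     '''图的染色'''
--     adj = {}
--     for u, v in edges:
--         adj.setdefault(u, []).append(v)
--         adj.setdefault(v, []).append(u)
--     colors = [-1] * (n + 1)
--     stack = [(1, 1)]
--     while stack:
--         node, parent_color = stack.pop()
--         if colors[node] != -1:
--             continue
--         current = 1 - parent_color
--         colors[node] = current
--         for nb in reversed(adj.get(node, ())):
--             stack.append((nb, current))
--     return colors[1:]
-- ===== Notes on version B (the rewrite author's own statement) =====
-- stated objective: alternative
-- what changed: The recursive DFS mutating a closed-over colors list is replaced by an iterative loop with an explicit stack (pushing neighbors in reverse so the pop order equals the recursive visiting order), removing recursion and its call-stack depth limit.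
-- outside the precondition, e.g. on func7(2, [(5, 6)]): A returns [0, -1], B returns [0, -1]
import Mathlib
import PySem

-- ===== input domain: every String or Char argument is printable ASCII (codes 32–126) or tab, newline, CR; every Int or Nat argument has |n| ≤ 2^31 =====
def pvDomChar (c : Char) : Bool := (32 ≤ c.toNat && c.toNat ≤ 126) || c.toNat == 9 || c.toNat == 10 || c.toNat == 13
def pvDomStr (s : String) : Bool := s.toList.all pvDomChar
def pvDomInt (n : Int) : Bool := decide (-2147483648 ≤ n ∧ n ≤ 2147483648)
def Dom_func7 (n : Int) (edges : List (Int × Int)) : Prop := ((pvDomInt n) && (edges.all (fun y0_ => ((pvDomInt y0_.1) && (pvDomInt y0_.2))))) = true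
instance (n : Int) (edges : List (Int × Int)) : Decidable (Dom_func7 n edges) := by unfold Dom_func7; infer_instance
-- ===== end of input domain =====

-- B replaces A's recursive DFS by an iterative explicit-stack loop (same visiting order via
-- reversed pushes); equivalence is about the return value (A mutates no argument).

-- ===== PORT A =====
-- Python list read c[i] (possibly negative index); out-of-range would raise in Python
-- (excluded by Pre_), here it returns 0 (≠ -1, so it never masks the -1 test).
def pvGet (c : List Int) (i : Int) : Int :=
  let j := if i < 0 then i + (c.length : Int) else i
  if 0 ≤ j ∧ j < (c.length : Int) then c.getD j.toNat 0 else 0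

-- Python list assignment c[i] = v (possibly negative index); out of range raises in Python
-- (excluded by Pre_), here it leaves the list unchanged.
def pvSet (c : List Int) (i : Int) (v : Int) : List Int :=
  let j := if i < 0 then i + (c.length : Int) else i
  if 0 ≤ j ∧ j < (c.length : Int) then c.set j.toNat v else c

-- the defaultdict(list) adjacency build: tree[u].append(v); tree[v].append(u)
-- (B's setdefault(u, []).append(v) performs the identical Dict update, so both ports share it)
def buildAdj (edges : List (Int × Int)) : PySem.Dict Int (List Int) :=
  edges.foldl (fun t p =>
    (t.modify p.1 [] (· ++ [p.2])).modify p.2 [] (· ++ [p.1])) PySem.Dict.empty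

-- tree[node] on the defaultdict: the mutation of tree it performs is unobservable (tree is
-- only read here), so a defaulted lookup is exact
def adjOf (t : PySem.Dict Int (List Int)) (node : Int) : List Int := t.getD node []

-- the recursive dfs; fuel is a totality guard only (colors.length + 1 always suffices,
-- each call colors a previously -1 cell)
mutual
def func7Dfs (tree : PySem.Dict Int (List Int)) (fuel : Nat) (node parentColor : Int)
    (colors : List Int) : List Int :=
  match fuel with
  | 0 => colors
  | f + 1 =>
    let cc := 1 - parentColor
    func7DfsLoop tree f cc (adjOf tree node) (pvSet colors node cc)
termination_by (fuel, 0)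

def func7DfsLoop (tree : PySem.Dict Int (List Int)) (fuel : Nat) (cc : Int)
    (nbrs : List Int) (colors : List Int) : List Int :=
  match nbrs with
  | [] => colors
  | nb :: rest =>
    func7DfsLoop tree fuel cc rest
      (if pvGet colors nb = -1 then func7Dfs tree fuel nb cc colors else colors)
termination_by (fuel, nbrs.length + 1)
end

def func7 (n : Int) (edges : List (Int × Int)) : List Int :=
  let tree := buildAdj edges
  let colors := List.replicate (n + 1).toNat (-1)
  let colors := func7Dfs tree (colors.length + 1) 1 1 colors
  colors.drop 1          -- colors[1:]

-- ===== PORT B =====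
def adjTotal (t : PySem.Dict Int (List Int)) : Nat := (t.values.map List.length).sum

-- the while-stack loop; fuel is a totality guard only (every iteration pops, each coloring
-- pushes at most adjTotal entries and removes a -1 cell)
def func7AltLoop (tree : PySem.Dict Int (List Int)) (fuel : Nat)
    (stack : List (Int × Int)) (colors : List Int) : List Int :=
  match fuel, stack with
  | _, [] => colors
  | 0, _ :: _ => colors
  | f + 1, (node, pc) :: rest =>
    if pvGet colors node ≠ -1 then func7AltLoop tree f rest colors
    else
      let cc := 1 - pc
      let colors' := pvSet colors node cc
      let stack' := (adjOf tree node).reverse.foldl (fun st nb => (nb, cc) :: st) rest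
      func7AltLoop tree f stack' colors'

def func7_alt (n : Int) (edges : List (Int × Int)) : List Int :=
  let tree := buildAdj edges
  let colors := List.replicate (n + 1).toNat (-1)
  let colors := func7AltLoop tree (colors.length * (adjTotal tree + 1) + 1) [(1, 1)] colors
  colors.drop 1          -- colors[1:]

-- ===== PRECONDITION & SPEC =====
-- A raises IndexError when n < 1 (the root assignment colors[1]) or when a visited edge
-- endpoint lies outside Python's valid index range [-(n+1), n] of the (n+1)-long colors list;
-- to stay closed-form Pre_ excludes ALL out-of-range endpoints, which also drops inputs whose
-- out-of-range endpoints are unreachable from node 1 — there A returns and B returns the same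
-- value (see cites).
def Pre_func7 (n : Int) (edges : List (Int × Int)) : Prop :=
  1 ≤ n ∧ ∀ p ∈ edges, -(n + 1) ≤ p.1 ∧ p.1 ≤ n ∧ -(n + 1) ≤ p.2 ∧ p.2 ≤ n

instance (n : Int) (edges : List (Int × Int)) : Decidable (Pre_func7 n edges) := by
  unfold Pre_func7; infer_instance

def pvWitness_func7 : Int × (List (Int × Int)) := (3, [(1, 2), (2, 3)])

def Spec_func7 (n : Int) (edges : List (Int × Int)) (out : List Int) : Prop := out = func7_alt n edges
instance (n : Int) (edges : List (Int × Int)) (out : List Int) : Decidable (Spec_func7 n edges out) := by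
  unfold Spec_func7; infer_instance

-- ===== CLAIM (what is proved, stated in full; the proofs are below) =====
def Claim_equal_func7 : Prop := ∀ (n : Int) (edges : List (Int × Int)), Dom_func7 n edges → Pre_func7 n edges → Spec_func7 n edges (func7 n edges)

-- ===== LEMMAS AND PROOFS =====

-- number of still-uncolored (-1) cells
def countNeg (c : List Int) : Nat := c.count (-1)

-- A's dfs applied along a stack of pending (node, parent_color) calls, each guarded as at
-- its call site; proof-only bridge between the two ports
def runStack (tree : PySem.Dict Int (List Int)) : List (Int × Int) → List Int → List Int
  | [], c => c
  | (node, pc) :: rest, c =>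
    if pvGet c node = -1 then runStack tree rest (func7Dfs tree (countNeg c + 1) node pc c)
    else runStack tree rest c

-- Python list facts ------------------------------------------------------------

theorem pvGet_neg1_spec (c : List Int) (i : Int) (h : pvGet c i = -1) :
    ∃ j : Nat, j < c.length ∧ c.getD j 0 = -1 ∧ ∀ v : Int, pvSet c i v = c.set j v := by
  unfold pvGet at h
  by_cases hc : 0 ≤ (if i < 0 then i + (c.length : Int) else i) ∧
      (if i < 0 then i + (c.length : Int) else i) < (c.length : Int)
  · refine ⟨(if i < 0 then i + (c.length : Int) else i).toNat, by omega, ?_, fun v => ?_⟩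
    · simpa [hc] using h
    · unfold pvSet; simp [hc]
  · rw [if_neg hc] at h; exact absurd h (by norm_num)

theorem count_set_le : ∀ (c : List Int) (j : Nat) (v : Int), v ≠ -1 →
    (c.set j v).count (-1) ≤ c.count (-1) := by
  intro c
  induction c with
  | nil => simp
  | cons a t ih =>
    intro j v hv
    cases j with
    | zero => simp [hv]; rw [List.count_cons]; exact Nat.le_add_right _ _
    | succ j =>
      simp only [List.set, List.count_cons]
      exact Nat.add_le_add_right (ih j v hv) _

theorem count_set_neg1 : ∀ (c : List Int) (j : Nat), j < c.length → c.getD j 0 = -1 →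
    ∀ v : Int, v ≠ -1 → (c.set j v).count (-1) + 1 = c.count (-1) := by
  intro c
  induction c with
  | nil => simp
  | cons a t ih =>
    intro j hj hg v hv
    cases j with
    | zero =>
      simp only [List.getD, List.getElem?_cons_zero, Option.getD_some] at hg
      subst hg
      simp [hv]
    | succ j =>
      simp only [List.length_cons, Nat.succ_lt_succ_iff] at hj
      simp only [List.getD_cons_succ] at hg
      simp only [List.set, List.count_cons]
      have := ih j hj hg v hv
      omega

theorem countNeg_pvSet_le (c : List Int) (i v : Int) (hv : v ≠ -1) :
    countNeg (pvSet c i v) ≤ countNeg c := by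
  unfold countNeg pvSet; dsimp only
  split <;> split <;> first
    | exact count_set_le c _ v hv
    | exact le_rfl


theorem countNeg_pvSet_lt (c : List Int) (i v : Int) (h : pvGet c i = -1) (hv : v ≠ -1) :
    countNeg (pvSet c i v) + 1 = countNeg c := by
  obtain ⟨j, hj, hg, hset⟩ := pvGet_neg1_spec c i h
  rw [countNeg, countNeg, hset v]
  exact count_set_neg1 c j hj hg v hv

theorem countNeg_pos (c : List Int) (i : Int) (h : pvGet c i = -1) : 1 ≤ countNeg c := by
  obtain ⟨j, hj, hg, -⟩ := pvGet_neg1_spec c i h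
  have hmem : (-1 : Int) ∈ c := by
    rw [List.getD_eq_getElem c 0 hj] at hg
    exact hg ▸ List.getElem_mem hj
  simpa [countNeg] using List.count_pos_iff.mpr hmem

theorem cc_inv {pc : Int} (h : pc = 0 ∨ pc = 1) : (1 - pc = 0 ∨ 1 - pc = 1) ∧ 1 - pc ≠ -1 := by
  rcases h with h | h <;> subst h <;> norm_num

-- monotonicity: dfs never creates new -1 cells -------------------------------

theorem mn_loop (tree : PySem.Dict Int (List Int)) (fuel : Nat)
    (hd : ∀ node pc c, (pc = 0 ∨ pc = 1) → countNeg (func7Dfs tree fuel node pc c) ≤ countNeg c) :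
    ∀ (nbrs : List Int) (cc : Int) (c : List Int), (cc = 0 ∨ cc = 1) →
      countNeg (func7DfsLoop tree fuel cc nbrs c) ≤ countNeg c := by
  intro nbrs
  induction nbrs with
  | nil => intro cc c _; rw [func7DfsLoop]
  | cons nb rest ih =>
    intro cc c hcc
    rw [func7DfsLoop]
    refine le_trans (ih cc _ hcc) ?_
    split
    · exact hd nb cc c hcc
    · exact le_rfl

theorem mn_dfs (tree : PySem.Dict Int (List Int)) :
    ∀ (fuel : Nat) (node pc : Int) (c : List Int), (pc = 0 ∨ pc = 1) →
      countNeg (func7Dfs tree fuel node pc c) ≤ countNeg c := by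
  intro fuel
  induction fuel with
  | zero => intro node pc c _; rw [func7Dfs]
  | succ f ih =>
    intro node pc c hpc
    obtain ⟨hcc, hccne⟩ := cc_inv hpc
    rw [func7Dfs]
    refine le_trans (mn_loop tree f (fun n p cl hp => ih n p cl hp) _ _ _ hcc) ?_
    exact countNeg_pvSet_le c node (1 - pc) hccne

-- fuel stability -------------------------------------------------------------

theorem st_loop (tree : PySem.Dict Int (List Int)) (k f g : Nat) (cc : Int)
    (hcc : cc = 0 ∨ cc = 1)
    (hd : ∀ c node, countNeg c ≤ k → pvGet c node = -1 → countNeg c < f → countNeg c < g →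
      func7Dfs tree f node cc c = func7Dfs tree g node cc c) :
    ∀ (nbrs : List Int) (c : List Int), countNeg c ≤ k → countNeg c < f → countNeg c < g →
      func7DfsLoop tree f cc nbrs c = func7DfsLoop tree g cc nbrs c := by
  intro nbrs
  induction nbrs with
  | nil => intro c _ _ _; rw [func7DfsLoop, func7DfsLoop]
  | cons nb rest ih =>
    intro c hk hf hg
    rw [func7DfsLoop, func7DfsLoop]
    by_cases hguard : pvGet c nb = -1
    · simp only [hguard, if_true]
      rw [hd c nb hk hguard hf hg]
      have hle : countNeg (func7Dfs tree g nb cc c) ≤ countNeg c := mn_dfs tree g nb cc c hcc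
      exact ih _ (le_trans hle hk) (lt_of_le_of_lt hle hf) (lt_of_le_of_lt hle hg)
    · simp only [hguard, if_false]
      exact ih c hk hf hg

theorem st_dfs (tree : PySem.Dict Int (List Int)) :
    ∀ (k : Nat) (c : List Int) (f g : Nat) (node pc : Int), countNeg c ≤ k →
      pvGet c node = -1 → (pc = 0 ∨ pc = 1) → countNeg c < f → countNeg c < g →
      func7Dfs tree f node pc c = func7Dfs tree g node pc c := by
  intro k
  induction k with
  | zero =>
    intro c f g node pc hk hguard _ _ _
    exact absurd (countNeg_pos c node hguard) (by omega)
  | succ k ih =>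
    intro c f g node pc hk hguard hpc hf hg
    have hpos : 1 ≤ countNeg c := countNeg_pos c node hguard
    obtain ⟨f', rfl⟩ : ∃ f', f = f' + 1 := ⟨f - 1, by omega⟩
    obtain ⟨g', rfl⟩ : ∃ g', g = g' + 1 := ⟨g - 1, by omega⟩
    obtain ⟨hcc, hccne⟩ := cc_inv hpc
    rw [func7Dfs, func7Dfs]
    have hcnt : countNeg (pvSet c node (1 - pc)) + 1 = countNeg c :=
      countNeg_pvSet_lt c node (1 - pc) hguard hccne
    exact st_loop tree k f' g' (1 - pc) hcc
      (fun cl nd hk' hg' hf'' hg'' => ih cl f' g' nd (1 - pc) hk' hg' hcc hf'' hg'')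
      _ _ (by omega) (by omega) (by omega)

-- dfs's neighbor loop is runStack on the pending-call list -------------------

theorem loop_eq_runStack (tree : PySem.Dict Int (List Int)) :
    ∀ (nbrs : List Int) (c : List Int) (f : Nat) (cc : Int), (cc = 0 ∨ cc = 1) →
      countNeg c < f →
      func7DfsLoop tree f cc nbrs c = runStack tree (nbrs.map (fun nb => (nb, cc))) c := by
  intro nbrs
  induction nbrs with
  | nil => intro c f cc _ _; rw [func7DfsLoop]; rfl
  | cons nb rest ih =>
    intro c f cc hcc hf
    rw [func7DfsLoop]
    simp only [List.map_cons]
    rw [runStack]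
    by_cases hguard : pvGet c nb = -1
    · simp only [hguard, if_true]
      have hst : func7Dfs tree f nb cc c = func7Dfs tree (countNeg c + 1) nb cc c :=
        st_dfs tree (countNeg c) c f (countNeg c + 1) nb cc le_rfl hguard hcc hf (by omega)
      rw [← hst]
      have hle : countNeg (func7Dfs tree f nb cc c) ≤ countNeg c := mn_dfs tree f nb cc c hcc
      exact ih _ f cc hcc (lt_of_le_of_lt hle hf)
    · simp only [hguard, if_false]
      exact ih c f cc hcc hf

theorem runStack_append (tree : PySem.Dict Int (List Int)) :
    ∀ (a b : List (Int × Int)) (c : List Int),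
      runStack tree (a ++ b) c = runStack tree b (runStack tree a c) := by
  intro a
  induction a with
  | nil => intro b c; rfl
  | cons p rest ih =>
    intro b c
    obtain ⟨node, pc⟩ := p
    simp only [List.cons_append]
    rw [runStack, runStack]
    split <;> exact ih b _

theorem rev_foldl_push (l : List Int) (cc : Int) (rest : List (Int × Int)) :
    l.reverse.foldl (fun st nb => (nb, cc) :: st) rest
      = l.map (fun nb => (nb, cc)) ++ rest := by
  rw [List.foldl_reverse]
  induction l with
  | nil => rfl
  | cons x xs ih => simp [ih]

theorem deg_le_adjTotal (t : PySem.Dict Int (List Int)) (node : Int) :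
    (adjOf t node).length ≤ adjTotal t := by
  unfold adjOf adjTotal
  rcases h : t.get? node with _ | v
  · rw [t.getD_of_get?_eq_none [] h]; simp
  · rw [t.getD_of_get?_eq_some [] h]
    have hitems : (node, v) ∈ t.items := PySem.Dict.mem_items_of_get?_eq_some t h
    have hv : v ∈ t.values := by
      simpa [PySem.Dict.values] using List.mem_map_of_mem (f := Prod.snd) hitems
    exact List.single_le_sum (fun x _ => Nat.zero_le x) _ (List.mem_map_of_mem (f := List.length) hv)

-- B's stack loop is runStack --------------------------------------------------

theorem altLoop_eq_runStack (tree : PySem.Dict Int (List Int)) :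
    ∀ (fB : Nat) (stack : List (Int × Int)) (c : List Int),
      (∀ p ∈ stack, p.2 = 0 ∨ p.2 = 1) →
      stack.length + countNeg c * (adjTotal tree + 1) ≤ fB →
      func7AltLoop tree fB stack c = runStack tree stack c := by
  intro fB
  induction fB with
  | zero =>
    intro stack c _ hb
    have : stack = [] := by
      cases stack with
      | nil => rfl
      | cons p rest => simp [List.length_cons] at hb
    subst this
    rfl
  | succ f ih =>
    intro stack c hinv hb
    match stack with
    | [] => rfl
    | (node, pc) :: rest =>
      rw [func7AltLoop, runStack]
      by_cases hguard : pvGet c node = -1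
      · rw [if_neg (not_not_intro hguard), if_pos hguard]
        show func7AltLoop tree f
            ((adjOf tree node).reverse.foldl (fun st nb => (nb, 1 - pc) :: st) rest)
            (pvSet c node (1 - pc))
          = runStack tree rest (func7Dfs tree (countNeg c + 1) node pc c)
        have hpc : pc = 0 ∨ pc = 1 := hinv (node, pc) List.mem_cons_self
        obtain ⟨hcc, hccne⟩ := cc_inv hpc
        have hcnt : countNeg (pvSet c node (1 - pc)) + 1 = countNeg c :=
          countNeg_pvSet_lt c node (1 - pc) hguard hccne
        have hdeg : (adjOf tree node).length ≤ adjTotal tree := deg_le_adjTotal tree node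
        rw [rev_foldl_push]
        rw [ih _ _ ?hinv ?hb]
        case hinv =>
          intro p hp
          rcases List.mem_append.mp hp with hp | hp
          · obtain ⟨nb, -, rfl⟩ := List.mem_map.mp hp
            exact hcc
          · exact hinv p (List.mem_cons_of_mem _ hp)
        case hb =>
          simp only [List.length_append, List.length_map, List.length_cons] at hb ⊢
          nlinarith [hcnt, hdeg, hb]
        rw [runStack_append]
        congr 1
        rw [func7Dfs]
        exact (loop_eq_runStack tree _ _ _ _ hcc (by omega)).symm
      · rw [if_pos hguard, if_neg hguard]
        exact ih rest c (fun p hp => hinv p (List.mem_cons_of_mem _ hp))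
          (by simp only [List.length_cons] at hb; omega)

-- ===== VERDICT (by name: the statement is the Claim_ definition above) =====
theorem replicate_pvGet_one {m : Nat} (h : 2 ≤ m) :
    pvGet (List.replicate m (-1 : Int)) 1 = -1 := by
  unfold pvGet
  simp only [List.length_replicate]
  norm_num
  rw [if_pos (show 1 < m by omega)]
  simp [show 1 < m by omega]

theorem func7_spec : Claim_equal_func7 := by
  intro n edges hdom hpre
  unfold Spec_func7 func7 func7_alt
  obtain ⟨hn, -⟩ := hpre
  show (func7Dfs (buildAdj edges) ((List.replicate (n + 1).toNat (-1)).length + 1) 1 1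
          (List.replicate (n + 1).toNat (-1))).drop 1
      = (func7AltLoop (buildAdj edges)
          ((List.replicate (n + 1).toNat (-1)).length * (adjTotal (buildAdj edges) + 1) + 1)
          [(1, 1)] (List.replicate (n + 1).toNat (-1))).drop 1
  set tree := buildAdj edges with htree
  set c0 : List Int := List.replicate (n + 1).toNat (-1) with hc0
  have hlen : 2 ≤ c0.length := by rw [hc0, List.length_replicate]; omega
  have hcnt : countNeg c0 = c0.length := by
    rw [hc0, countNeg, List.count_replicate, List.length_replicate]; simp
  have hget : pvGet c0 1 = -1 := by
    rw [hc0]; exact replicate_pvGet_one (by rwa [hc0, List.length_replicate] at hlen)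
  have halt : func7AltLoop tree (c0.length * (adjTotal tree + 1) + 1) [(1, 1)] c0
      = runStack tree [(1, 1)] c0 := by
    refine altLoop_eq_runStack tree _ _ _ ?_ ?_
    · intro p hp
      simp only [List.mem_singleton] at hp
      subst hp
      exact Or.inr rfl
    · rw [hcnt]
      simp only [List.length_singleton]
      nlinarith [hlen]
  rw [halt, runStack, if_pos hget, runStack, hcnt]
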